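-- pv_equiv track=rewrite | github.com/dao1oad/fqpack-next | upgrade_subprj.py | should_exclude
-- ===== SOURCE A (Python) =====
-- EXCLUDE_DIRS = {".git", "__pycache__", ".aider.tags.cache.v3", ".venv", "node_modules", ".pytest_cache", "dist", "build"}
--
-- EXCLUDE_PATTERNS = {"*.egg-info", ".aider.chat.history.md", "*.pyc", ".DS_Store"}
--
-- def should_exclude(name: str, is_dir: bool) -> bool:
--     """判断是否应排除该文件/目录"""
--     if is_dir:
--         return name in EXCLUDE_DIRS
--     # 简单模式匹配
--     for pattern in EXCLUDE_PATTERNS: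
--         if pattern.startswith("*."):
--             if name.endswith(pattern[1:]):
--                 return True
--         elif name == pattern:
--             return True
--     return False
-- ===== SOURCE B (Python) =====
-- EXCLUDE_DIRS = {".git", "__pycache__", ".aider.tags.cache.v3", ".venv", "node_modules", ".pytest_cache", "dist", "build"}
--
-- # EXCLUDE_PATTERNS pre-partitioned once: exact names and '*.X' suffixes
-- EXACT_FILES = {".aider.chat.history.md", ".DS_Store"}
-- SUFFIXES = (".egg-info", ".pyc")
--
-- def should_exclude(name: str, is_dir: bool) -> bool:
--     if is_dir:
--         return name in EXCLUDE_DIRS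
--     return name in EXACT_FILES or name.endswith(SUFFIXES)
-- ===== Notes on version B (the rewrite author's own statement) =====
-- stated objective: idiomatic
-- what changed: The per-call loop that classifies each pattern (wildcard vs exact) on every iteration is removed: the pattern set is partitioned once at module level into exact names and a suffix tuple, and the file branch becomes a single membership test plus one endswith(tuple) call.
import Mathlib
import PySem

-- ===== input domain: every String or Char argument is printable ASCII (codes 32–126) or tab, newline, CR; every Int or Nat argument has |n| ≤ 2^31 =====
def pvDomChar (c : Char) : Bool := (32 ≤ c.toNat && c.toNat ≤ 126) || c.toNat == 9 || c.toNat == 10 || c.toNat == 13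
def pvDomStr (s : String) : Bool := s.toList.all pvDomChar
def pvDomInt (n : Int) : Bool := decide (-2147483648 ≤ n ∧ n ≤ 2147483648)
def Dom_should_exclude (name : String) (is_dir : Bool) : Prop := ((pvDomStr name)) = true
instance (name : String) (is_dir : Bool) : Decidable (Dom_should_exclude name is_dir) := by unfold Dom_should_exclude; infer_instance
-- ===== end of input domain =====

-- B replaces A's per-call pattern-classification loop with a precomputed exact-name set
-- and a suffix tuple checked by endswith (objective: idiomatic); same return value.

-- ===== PORT A =====
def pvExcludeDirs : PySem.Set String :=
  PySem.Set.ofList [".git", "__pycache__", ".aider.tags.cache.v3", ".venv",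
                    "node_modules", ".pytest_cache", "dist", "build"]

def pvExcludePatterns : PySem.Set String :=
  PySem.Set.ofList ["*.egg-info", ".aider.chat.history.md", "*.pyc", ".DS_Store"]

-- the 'for pattern in EXCLUDE_PATTERNS' loop with its early returns
def pvPatternLoop (name : String) : List String → Bool
  | [] => false
  | p :: ps =>
    if PySem.Str.startswith p "*." then
      if PySem.Str.endswith name (String.ofList (PySem.List.slice p.toList (some 1) none)) then
        true
      else pvPatternLoop name ps
    else if name == p then true
    else pvPatternLoop name ps

def should_exclude (name : String) (is_dir : Bool) : Bool :=
  if is_dir then PySem.Set.contains pvExcludeDirs name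
  else pvPatternLoop name pvExcludePatterns

-- ===== PORT B =====
def pvExactFiles : PySem.Set String :=
  PySem.Set.ofList [".aider.chat.history.md", ".DS_Store"]

def pvSuffixes : List String := [".egg-info", ".pyc"]

def should_exclude_alt (name : String) (is_dir : Bool) : Bool :=
  if is_dir then PySem.Set.contains pvExcludeDirs name
  else PySem.Set.contains pvExactFiles name
       || pvSuffixes.any (fun suf => PySem.Str.endswith name suf)  -- name.endswith(tuple)

-- ===== PRECONDITION & SPEC =====
def Spec_should_exclude (name : String) (is_dir : Bool) (out : Bool) : Prop := out = should_exclude_alt name is_dir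
instance (name : String) (is_dir : Bool) (out : Bool) : Decidable (Spec_should_exclude name is_dir out) := by unfold Spec_should_exclude; infer_instance

-- ===== CLAIM (what is proved, stated in full; the proofs are below) =====
def Claim_equal_should_exclude : Prop := ∀ (name : String) (is_dir : Bool), Dom_should_exclude name is_dir → Spec_should_exclude name is_dir (should_exclude name is_dir)

-- ===== LEMMAS AND PROOFS =====
theorem pvIsSuffixOf_eq (p l : List Char) : p.isSuffixOf l = decide (p <:+ l) := by
  rw [Bool.eq_iff_iff]; simp [List.isSuffixOf]

-- ===== VERDICT (by name: the statement is the Claim_ definition above) =====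
theorem should_exclude_spec : Claim_equal_should_exclude := by
  intro name is_dir _
  unfold Spec_should_exclude should_exclude should_exclude_alt
  cases is_dir with
  | true => simp
  | false =>
    simp only [Bool.false_eq_true, ite_false]
    simp [pvPatternLoop, pvExcludePatterns, pvExactFiles, pvSuffixes, PySem.Set.ofList,
          PySem.Set.contains, PySem.List.slice, PySem.Chars.startswith, PySem.Chars.endswith,
          List.isPrefixOf_iff_prefix, List.isSuffixOf_iff_suffix]
    by_cases h1 : PySem.Str.endswith name ".egg-info" = true <;>
    by_cases h2 : PySem.Str.endswith name ".pyc" = true <;>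
    by_cases h3 : name = ".aider.chat.history.md" <;>
    by_cases h4 : name = ".DS_Store" <;>
    simp_all [pvIsSuffixOf_eq]
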